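-- pv_equiv track=rewrite | github.com/achobgood/wxops | src/wxcli/migration/report/helpers.py | strip_canonical_id
-- ===== SOURCE A (Python) =====
-- _KNOWN_PREFIXES = (
--     "css:", "device:", "location:", "partition:", "trunk:",
--     "route_group:", "dial_plan:", "voicemail_profile:",
--     "hunt_group:", "auto_attendant:", "call_queue:", "call_park:",
--     "pickup_group:", "paging_group:", "workspace:", "schedule:",
--     "operating_mode:", "shared_line:", "virtual_line:", "line:",
--     "calling_permission:", "translation_pattern:", "user:",
-- )
--
-- def strip_canonical_id(canonical_id: str) -> str:
--     """Strip internal canonical ID prefixes for customer-facing display.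
--
--     Examples:
--         "css:Standard-Employee-CSS" → "Standard-Employee-CSS"
--         "dn:1001:Internal-PT" → "1001 (Internal-PT)"
--         "voicemail_profile:Default" → "Default"
--         "plain-string" → "plain-string"
--     """
--     if not canonical_id:
--         return ""
--
--     # Special case: dn:NUMBER:PARTITION
--     if canonical_id.startswith("dn:"):
--         parts = canonical_id[3:].split(":", 1)
--         if len(parts) == 2:
--             return f"{parts[0]} ({parts[1]})"
--         return parts[0]
--
--     # Known prefixes
--     for prefix in _KNOWN_PREFIXES:
--         if canonical_id.startswith(prefix):
--             return canonical_id[len(prefix):]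
--
--     # Unknown prefix — if there's a colon, strip up to first colon
--     if ":" in canonical_id:
--         return canonical_id.split(":", 1)[1]
--
--     return canonical_id
-- ===== SOURCE B (Python) =====
-- def strip_canonical_id(canonical_id: str) -> str:
--     """Same display-stripping, without the prefix table: every known prefix is a
--     colon-terminated colon-free token, so stripping it equals stripping to the
--     first colon."""
--     if not canonical_id:
--         return ""
--     if canonical_id.startswith("dn:"):
--         rest = canonical_id[3:]
--         i = rest.find(":")
--         return rest if i < 0 else f"{rest[:i]} ({rest[i + 1:]})"
--     i = canonical_id.find(":")
--     return canonical_id if i < 0 else canonical_id[i + 1:]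
-- ===== Notes on version B (the rewrite author's own statement) =====
-- stated objective: simpler
-- what changed: B drops the 23-entry known-prefix table and its scan loop entirely: since every known prefix is a colon-free token ending in a colon, stripping it equals stripping to the first colon, so B is a single first-colon search with slice arithmetic (and the dn special case kept).
import Mathlib
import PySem

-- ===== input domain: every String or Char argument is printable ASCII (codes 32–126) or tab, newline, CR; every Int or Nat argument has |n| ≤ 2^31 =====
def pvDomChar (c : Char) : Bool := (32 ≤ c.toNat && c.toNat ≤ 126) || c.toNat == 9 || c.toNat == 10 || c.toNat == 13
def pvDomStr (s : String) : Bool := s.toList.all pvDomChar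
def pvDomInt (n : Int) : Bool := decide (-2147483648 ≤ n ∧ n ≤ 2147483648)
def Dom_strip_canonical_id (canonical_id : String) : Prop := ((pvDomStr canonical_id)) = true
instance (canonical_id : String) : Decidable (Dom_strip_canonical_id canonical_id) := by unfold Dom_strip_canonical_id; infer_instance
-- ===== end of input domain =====

-- B replaces A's 23-entry known-prefix table and its scan loop by a single first-colon search
-- (every known prefix is a colon-free token ending in a colon); objective: simpler.

-- ===== PORT A =====
-- the module constant _KNOWN_PREFIXES, as lists of chars
def knownPrefixes : List (List Char) :=
  ["css:".toList, "device:".toList, "location:".toList, "partition:".toList, "trunk:".toList,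
   "route_group:".toList, "dial_plan:".toList, "voicemail_profile:".toList,
   "hunt_group:".toList, "auto_attendant:".toList, "call_queue:".toList, "call_park:".toList,
   "pickup_group:".toList, "paging_group:".toList, "workspace:".toList, "schedule:".toList,
   "operating_mode:".toList, "shared_line:".toList, "virtual_line:".toList, "line:".toList,
   "calling_permission:".toList, "translation_pattern:".toList, "user:".toList]

-- the 'for prefix in _KNOWN_PREFIXES' loop with its early return
def aLoop (ps : List (List Char)) (cs : List Char) : Option (List Char) :=
  match ps with
  | [] => none
  | p :: ps' =>
    if PySem.Chars.startswith cs p then some (PySem.List.slice cs (some (p.length : Int)) none)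
    else aLoop ps' cs

-- A's body on the char list (parts.getD i [] is parts[i]; in A both indexings are in range,
-- since split(":",1) always returns ≥ 1 piece and the other is guarded by len(parts)==2 / "in")
def aCore (cs : List Char) : List Char :=
  if cs.isEmpty then []
  else if PySem.Chars.startswith cs "dn:".toList then
    let parts := PySem.Chars.splitOnMax (PySem.List.slice cs (some 3) none) [':'] 1
    if parts.length = 2 then
      parts.getD 0 [] ++ " (".toList ++ parts.getD 1 [] ++ ")".toList
    else parts.getD 0 []
  else
    match aLoop knownPrefixes cs with
    | some r => r
    | none =>
      if PySem.Chars.isIn [':'] cs then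
        (PySem.Chars.splitOnMax cs [':'] 1).getD 1 []
      else cs

def strip_canonical_id (canonical_id : String) : String :=
  String.mk (aCore canonical_id.toList)

-- ===== PORT B =====
def bCore (cs : List Char) : List Char :=
  if cs.isEmpty then []
  else if PySem.Chars.startswith cs "dn:".toList then
    let rest := PySem.List.slice cs (some 3) none
    let i := PySem.Chars.find rest [':']
    if i < 0 then rest
    else PySem.List.slice rest none (some i) ++ " (".toList
         ++ PySem.List.slice rest (some (i + 1)) none ++ ")".toList
  else
    let i := PySem.Chars.find cs [':']
    if i < 0 then cs
    else PySem.List.slice cs (some (i + 1)) none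

def strip_canonical_id_alt (canonical_id : String) : String :=
  String.mk (bCore canonical_id.toList)

-- ===== PRECONDITION & SPEC =====
def Spec_strip_canonical_id (canonical_id : String) (out : String) : Prop := out = strip_canonical_id_alt canonical_id
instance (canonical_id : String) (out : String) : Decidable (Spec_strip_canonical_id canonical_id out) := by unfold Spec_strip_canonical_id; infer_instance

-- ===== CLAIM (what is proved, stated in full; the proofs are below) =====
def Claim_equal_strip_canonical_id : Prop := ∀ (canonical_id : String), Dom_strip_canonical_id canonical_id → Spec_strip_canonical_id canonical_id (strip_canonical_id canonical_id)

-- ===== LEMMAS AND PROOFS =====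

-- [c] is a prefix of l iff l starts with c
lemma singleton_prefix_iff (c : Char) (l : List Char) : [c] <+: l ↔ l.head? = some c := by
  cases l <;> simp [List.cons_prefix_cons, eq_comm]

-- with maxsplit exhausted, split's loop returns the remainder as one last piece
lemma go_maxsplit_zero (f : Nat) (acc : List (List Char)) (t' : List Char) :
    PySem.Chars.splitOnMax.go [':'] f 0 t' [] acc = acc.reverse ++ [t'] := by
  cases f <;> cases t' <;> simp [PySem.Chars.splitOnMax.go]

-- split's loop on a colon-free string
lemma go_no_colon (s : List Char) (h : ':' ∉ s) :
    ∀ (f : Nat) (cur : List Char) (acc : List (List Char)), s.length < f →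
      PySem.Chars.splitOnMax.go [':'] f 1 s cur acc = acc.reverse ++ [cur.reverse ++ s] := by
  induction s with
  | nil => intro f cur acc hf; cases f <;> simp [PySem.Chars.splitOnMax.go] at *
  | cons c rest ih =>
    intro f cur acc hf
    match f, hf with
    | f' + 1, hf =>
      have hc : c ≠ ':' := by intro e; exact h (e ▸ List.mem_cons_self)
      have hpre : [':'].isPrefixOf (c :: rest) = false := by
        simp [List.isPrefixOf]; exact fun e => hc e.symm
      conv_lhs => rw [PySem.Chars.splitOnMax.go]
      simp only [hpre, Bool.false_eq_true, if_false, if_neg one_ne_zero]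
      rw [ih (fun hm => h (List.mem_cons_of_mem _ hm)) f' (c :: cur) acc (by simpa using hf)]
      simp

-- split's loop on a string whose first colon follows the colon-free block q
lemma go_colon (q : List Char) (hq : ':' ∉ q) :
    ∀ (t : List Char) (f : Nat) (cur : List Char) (acc : List (List Char)),
      (q ++ ':' :: t).length < f →
      PySem.Chars.splitOnMax.go [':'] f 1 (q ++ ':' :: t) cur acc
        = acc.reverse ++ [cur.reverse ++ q, t] := by
  induction q with
  | nil =>
    intro t f cur acc hf
    match f, hf with
    | f' + 1, hf =>
      have hpre : [':'].isPrefixOf (':' :: t) = true := by simp [List.isPrefixOf]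
      simp only [List.nil_append]
      conv_lhs => rw [PySem.Chars.splitOnMax.go]
      simp only [hpre, if_neg one_ne_zero, if_true]
      rw [show List.drop [':'].length (':' :: t) = t from rfl, go_maxsplit_zero]
      simp
  | cons c q' ih =>
    intro t f cur acc hf
    match f, hf with
    | f' + 1, hf =>
      have hc : c ≠ ':' := by intro e; exact hq (e ▸ List.mem_cons_self)
      have hpre : [':'].isPrefixOf (c :: (q' ++ ':' :: t)) = false := by
        simp [List.isPrefixOf]; exact fun e => hc e.symm
      simp only [List.cons_append]
      conv_lhs => rw [PySem.Chars.splitOnMax.go]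
      simp only [hpre, Bool.false_eq_true, if_false, if_neg one_ne_zero]
      rw [ih (fun hm => hq (List.mem_cons_of_mem _ hm)) t f' (c :: cur) acc (by simpa using hf)]
      simp

lemma split1_no_colon (s : List Char) (h : ':' ∉ s) :
    PySem.Chars.splitOnMax s [':'] 1 = [s] := by
  unfold PySem.Chars.splitOnMax
  rw [if_neg (by norm_num), show (1 : Int).toNat = 1 from rfl]
  rw [go_no_colon s h _ _ _ (by simp)]
  simp

lemma split1_colon (q t : List Char) (hq : ':' ∉ q) :
    PySem.Chars.splitOnMax (q ++ ':' :: t) [':'] 1 = [q, t] := by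
  unfold PySem.Chars.splitOnMax
  rw [if_neg (by norm_num), show (1 : Int).toNat = 1 from rfl]
  rw [go_colon q hq t _ _ _ (by simp)]
  simp

lemma find_colon_at (q t : List Char) (hq : ':' ∉ q) :
    PySem.Chars.find (q ++ ':' :: t) [':'] = (q.length : Int) := by
  have hat : [':'] <+: (q ++ ':' :: t).drop q.length := by
    rw [List.drop_left]; simp
  have hinf : [':'] <:+: (q ++ ':' :: t) := by
    have : q ++ ':' :: t = q ++ [':'] ++ t := by simp
    rw [this]; exact List.infix_append q [':'] t
  have h0 : 0 ≤ PySem.Chars.find (q ++ ':' :: t) [':'] :=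
    (PySem.Chars.find_nonneg_iff _ _).mpr hinf
  obtain ⟨hpre, hmin⟩ := PySem.Chars.find_spec h0
  set n := (PySem.Chars.find (q ++ ':' :: t) [':']).toNat with hn
  have hle : n ≤ q.length := by
    by_contra hlt
    exact (hmin q.length (by omega)) hat
  have hge : ¬ n < q.length := by
    intro hlt
    have hh : ((q ++ ':' :: t).drop n).head? = some ':' := (singleton_prefix_iff _ _).mp hpre
    rw [List.head?_drop, List.getElem?_append_left hlt] at hh
    exact hq (List.mem_of_getElem? hh)
  have : n = q.length := by omega
  omega

lemma find_colon_none (s : List Char) (h : ':' ∉ s) :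
    PySem.Chars.find s [':'] = -1 := by
  rw [PySem.Chars.find_eq_neg_one_iff]
  intro hinf
  obtain ⟨l₁, l₂, he⟩ := hinf
  exact h (by rw [← he]; simp)

lemma first_colon_decomp (s : List Char) (h : ':' ∈ s) :
    ∃ q t, s = q ++ ':' :: t ∧ ':' ∉ q := by
  induction s with
  | nil => cases h
  | cons c rest ih =>
    by_cases hc : c = ':'
    · exact ⟨[], rest, by simp [hc], by simp⟩
    · obtain ⟨q, t, he, hn⟩ := ih ((List.mem_cons.mp h).resolve_left (fun e => hc e.symm))
      exact ⟨c :: q, t, by simp [he], by simp [hn]; exact fun e => hc e.symm⟩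

lemma aLoop_some (ps : List (List Char)) (cs r : List Char) (h : aLoop ps cs = some r) :
    ∃ p ∈ ps, PySem.Chars.startswith cs p ∧ r = cs.drop p.length := by
  induction ps with
  | nil => simp [aLoop] at h
  | cons p ps' ih =>
    by_cases hp : PySem.Chars.startswith cs p
    · simp [aLoop, hp] at h; exact ⟨p, by simp, hp, h.symm⟩
    · simp [aLoop, hp] at h
      obtain ⟨p', hm, hs, hr⟩ := ih h
      exact ⟨p', by simp [hm], hs, hr⟩

lemma known_shape : ∀ p ∈ knownPrefixes, p = p.dropLast ++ [':'] ∧ ':' ∉ p.dropLast := by decide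

-- B's two slices around the first colon, in closed form
lemma take_fc (q t : List Char) :
    PySem.List.slice (q ++ ':' :: t) none (some (q.length : Int)) = q := by
  rw [PySem.List.slice_to _ (by omega)]
  simp

lemma drop_fc (q t : List Char) :
    PySem.List.slice (q ++ ':' :: t) (some ((q.length : Int) + 1)) none = t := by
  rw [PySem.List.slice_from _ (by omega),
    show ((q.length : Int) + 1).toNat = (q ++ [':']).length by simp,
    show q ++ ':' :: t = (q ++ [':']) ++ t by simp, List.drop_left]

lemma core_eq (cs : List Char) : aCore cs = bCore cs := by
  unfold aCore bCore
  by_cases he : cs.isEmpty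
  · simp [he]
  · simp only [he, Bool.false_eq_true, if_false]
    by_cases hdn : PySem.Chars.startswith cs "dn:".toList
    · simp only [hdn, if_true]
      have hslice : PySem.List.slice cs (some 3) none = cs.drop 3 := by
        simp [pysem]
      rw [hslice]
      by_cases hc : ':' ∈ cs.drop 3
      · obtain ⟨q, t, hqt, hq⟩ := first_colon_decomp _ hc
        rw [hqt, split1_colon q t hq, find_colon_at q t hq]
        rw [if_neg (show ¬ ((q.length : Int) < 0) by omega)]
        rw [take_fc, drop_fc]
        simp
      · rw [split1_no_colon _ hc, find_colon_none _ hc]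
        norm_num
    · simp only [hdn, Bool.false_eq_true, if_false]
      cases hl : aLoop knownPrefixes cs with
      | some r =>
        obtain ⟨p, hp, hs, hr⟩ := aLoop_some _ _ _ hl
        obtain ⟨hshape, hnc⟩ := known_shape p hp
        obtain ⟨u, hu⟩ := (PySem.Chars.startswith_iff _ _).mp hs
        have hcs : cs = p.dropLast ++ ':' :: u := by
          rw [← hu]; conv_lhs => rw [hshape]
          simp
        rw [hcs, find_colon_at _ _ hnc,
          if_neg (show ¬ ((p.dropLast.length : Int) < 0) by omega)]
        rw [hr, hcs, drop_fc]
        show List.drop p.length (p.dropLast ++ ':' :: u) = u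
        have hlen : p.length = p.dropLast.length + 1 := by
          conv_lhs => rw [hshape]
          simp
        rw [hlen, show p.dropLast ++ ':' :: u = (p.dropLast ++ [':']) ++ u by simp,
          List.drop_left' (by simp)]
      | none =>
        by_cases hc : ':' ∈ cs
        · obtain ⟨q, t, hqt, hq⟩ := first_colon_decomp _ hc
          subst hqt
          have hisin : PySem.Chars.isIn [':'] (q ++ ':' :: t) = true := by
            simp [PySem.Chars.isIn, find_colon_at q t hq]
          simp [hisin, split1_colon q t hq, find_colon_at q t hq, drop_fc]
        · have hisin : PySem.Chars.isIn [':'] cs = false := by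
            simp [PySem.Chars.isIn, find_colon_none cs hc]
          rw [hisin, find_colon_none cs hc]
          norm_num

-- ===== VERDICT (by name: the statement is the Claim_ definition above) =====
theorem strip_canonical_id_spec : Claim_equal_strip_canonical_id := by
  intro s _
  unfold Spec_strip_canonical_id strip_canonical_id strip_canonical_id_alt
  rw [core_eq]
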